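-- pv_equiv track=rewrite | github.com/daniel-reich/turbo-robot | vudQZFD64nDWkKz8a_12.py | grant_the_hint
-- ===== SOURCE A (Python) =====
-- def grant_the_hint(txt):
--     txtlst = txt.split()
--     finalst = []
--     sublst = []
--     maxlength = max([len(word) for word in txtlst])
--     for i in range(-1, maxlength):
--         for txt in txtlst:
--             if i == -1:
--                 sublst.append('_' * len(txt))
--             else:
--                sublst.append(txt[0:i+1] + ('_' * (len(txt)-(i+1))))
--         finalst.append(" ".join(sublst))
--         sublst = []
-- ##        if i == 4:
-- ##            break
--     return finalst
-- ===== SOURCE B (Python) =====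
-- def grant_the_hint(txt):
--     words = txt.split()
--     maxlength = max(len(w) for w in words)
--     # mutable masks, revealed incrementally one column per step
--     masks = [['_'] * len(w) for w in words]
--     lines = [' '.join(''.join(m) for m in masks)]
--     for r in range(maxlength):
--         for w, m in zip(words, masks):
--             if r < len(w):
--                 m[r] = w[r]
--         lines.append(' '.join(''.join(m) for m in masks))
--     return lines
-- ===== Notes on version B (the rewrite author's own statement) =====
-- stated objective: alternative
-- what changed: A recomputes every hint line from scratch with per-word slices inside a level-outer loop (and an i==-1 special case); B is incremental: it keeps mutable underscore masks, reveals one character column per step by in-place assignment m[r]=w[r], and re-renders the updated state after each step.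
import Mathlib
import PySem

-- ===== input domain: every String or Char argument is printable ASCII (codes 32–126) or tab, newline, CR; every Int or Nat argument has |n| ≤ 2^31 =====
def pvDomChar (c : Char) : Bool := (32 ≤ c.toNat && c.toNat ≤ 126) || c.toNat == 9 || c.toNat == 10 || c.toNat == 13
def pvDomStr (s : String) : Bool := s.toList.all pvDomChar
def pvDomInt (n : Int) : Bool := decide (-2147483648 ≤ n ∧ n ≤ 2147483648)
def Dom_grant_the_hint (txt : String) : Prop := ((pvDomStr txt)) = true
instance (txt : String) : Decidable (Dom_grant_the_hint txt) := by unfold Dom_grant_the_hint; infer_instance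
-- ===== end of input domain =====

-- B replaces A's recompute-each-line-from-scratch slicing by an incremental algorithm:
-- it keeps mutable underscore masks and reveals one character column per step, updating
-- the previous line's state in place; a different decomposition, not claimed faster.

-- ===== PORT A =====
-- '_' * n is List.replicate n.toNat '_' (Python gives '' for n ≤ 0, matching toNat's clamp).
def grant_the_hint (txt : String) : List String :=
  let txtlst := PySem.Chars.split₀ txt.toList
  match PySem.List.max? (txtlst.map (fun word => PySem.Chars.len word)) (fun x => x) with
  | none => []  -- Python: max([]) raises ValueError; excluded by Pre_grant_the_hint
  | some maxlength =>
    let finalst : List (List Char) :=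
      (PySem.List.pyRange (-1) maxlength 1).foldl (fun finalst i =>
        let sublst : List (List Char) :=
          txtlst.foldl (fun sublst t =>
            sublst ++ [if i = -1 then
                         List.replicate (PySem.Chars.len t).toNat '_'
                       else
                         PySem.Chars.slice t (some 0) (some (i+1)) ++
                           List.replicate ((PySem.Chars.len t) - (i+1)).toNat '_']) []
        finalst ++ [PySem.Chars.join [' '] sublst]) []
    finalst.map String.ofList

-- ===== PORT B =====
-- masks is the mutable list of per-word character lists; m[r] = w[r] is List.set;
-- the loop carries (lines, masks) and appends the re-rendered line after each reveal.
def grant_the_hint_alt (txt : String) : List String :=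
  let words := PySem.Chars.split₀ txt.toList
  match PySem.List.max? (words.map (fun w => PySem.Chars.len w)) (fun x => x) with
  | none => []  -- Python: max() of an empty generator raises ValueError; excluded by Pre_
  | some maxlength =>
    let masks0 : List (List Char) := words.map (fun w => List.replicate w.length '_')
    let st := (PySem.List.pyRange 0 maxlength 1).foldl
      (fun (st : List String × List (List Char)) r =>
        let masks' := List.zipWith
          (fun w m => if r < PySem.Chars.len w then m.set r.toNat (w.getD r.toNat '_') else m)
          words st.2
        (st.1 ++ [String.ofList (PySem.Chars.join [' '] masks')], masks'))
      ([String.ofList (PySem.Chars.join [' '] masks0)], masks0)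
    st.1

-- ===== PRECONDITION & SPEC =====
-- Pre_ excludes only whitespace-only/empty txt, where A's max([]) raises ValueError (B raises too).
def Pre_grant_the_hint (txt : String) : Prop := PySem.Chars.split₀ txt.toList ≠ []
instance (txt : String) : Decidable (Pre_grant_the_hint txt) := by
  unfold Pre_grant_the_hint; infer_instance
def pvWitness_grant_the_hint : String := "go big"

def Spec_grant_the_hint (txt : String) (out : List String) : Prop := out = grant_the_hint_alt txt
instance (txt : String) (out : List String) : Decidable (Spec_grant_the_hint txt out) := by unfold Spec_grant_the_hint; infer_instance

-- ===== CLAIM =====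
def Claim_equal_grant_the_hint : Prop := ∀ (txt : String), Dom_grant_the_hint txt → Pre_grant_the_hint txt → Spec_grant_the_hint txt (grant_the_hint txt)

-- ===== LEMMAS AND PROOFS =====

-- the mask of word w after k reveal steps
def pvMaskAt (k : Nat) (w : List Char) : List Char :=
  w.take k ++ List.replicate (w.length - k) '_'

theorem pvMaskAt_zero (w : List Char) : pvMaskAt 0 w = List.replicate w.length '_' := by
  simp [pvMaskAt]

-- revealing column k advances every mask from step k to step k+1
theorem pv_step (k : Nat) :
    ∀ (words : List (List Char)),
      List.zipWith
        (fun w m => if (k : Int) < PySem.Chars.len w then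
            m.set ((k : Int)).toNat (w.getD ((k : Int)).toNat '_') else m)
        words (words.map (pvMaskAt k))
      = words.map (pvMaskAt (k + 1)) := by
  intro words
  induction words with
  | nil => simp
  | cons w ws ih =>
    simp only [List.map_cons, List.zipWith_cons_cons, ih]
    congr 1
    by_cases h : k < w.length
    · rw [if_pos (by simp [PySem.Chars.len_eq]; exact_mod_cast h)]
      simp only [Int.toNat_natCast, pvMaskAt]
      rw [List.set_append]
      have htk : (w.take k).length = k := by simp; omega
      rw [if_neg (by omega), htk, Nat.sub_self]
      have hrep : w.length - k = (w.length - (k + 1)) + 1 := by omega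
      rw [hrep, List.replicate_succ, List.set_cons_zero]
      rw [List.take_add_one]
      have : w[k]?.toList = [w.getD k '_'] := by
        simp [List.getD, List.getElem?_eq_getElem h]
      simp [this]
    · rw [if_neg (by simp [PySem.Chars.len_eq]; omega)]
      simp [pvMaskAt, List.take_of_length_le (by omega : w.length ≤ k),
            List.take_of_length_le (by omega : w.length ≤ k + 1),
            Nat.sub_eq_zero_of_le (by omega : w.length ≤ k),
            Nat.sub_eq_zero_of_le (by omega : w.length ≤ k + 1)]

-- B's loop invariant: after m steps the lines are rendered masks at 0..m and the state is the mask at m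
theorem pv_fold_inv (words : List (List Char)) (m : Nat) :
    (PySem.List.pyRange 0 (m : Int) 1).foldl
      (fun (st : List String × List (List Char)) r =>
        let masks' := List.zipWith
          (fun w mk => if r < PySem.Chars.len w then mk.set r.toNat (w.getD r.toNat '_') else mk)
          words st.2
        (st.1 ++ [String.ofList (PySem.Chars.join [' '] masks')], masks'))
      ([String.ofList (PySem.Chars.join [' '] (words.map (pvMaskAt 0)))], words.map (pvMaskAt 0))
    = ((List.range (m + 1)).map
         (fun k => String.ofList (PySem.Chars.join [' '] (words.map (pvMaskAt k)))),
       words.map (pvMaskAt m)) := by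
  induction m with
  | zero => simp [PySem.List.pyRange_one_eq_nil]
  | succ n ih =>
    have hsplit : PySem.List.pyRange 0 ((n + 1 : Nat) : Int) 1
        = PySem.List.pyRange 0 (n : Int) 1 ++ [(n : Int)] := by
      push_cast
      exact PySem.List.pyRange_one_succ_right (by positivity)
    rw [hsplit, List.foldl_append, ih]
    simp only [List.foldl_cons, List.foldl_nil]
    rw [pv_step n words]
    rw [List.range_succ (n := n + 1)]
    simp

-- a foldl that appends one element per step is a map (A's inner and outer loops)
theorem pv_foldl_append_map {α β : Type} (f : α → β) :
    ∀ (l : List α) (init : List β),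
      l.foldl (fun acc x => acc ++ [f x]) init = init ++ l.map f := by
  intro l
  induction l with
  | nil => intro init; simp
  | cons x xs ih => intro init; simp [ih]

-- A's line at loop index i = -1 + k is the mask at step k
theorem pv_maskA_eq (w : List Char) (k : Nat) :
    (if (-1 + (k : Int)) = -1 then
        List.replicate (PySem.Chars.len w).toNat '_'
      else
        PySem.Chars.slice w (some 0) (some ((-1 + (k : Int)) + 1)) ++
          List.replicate ((PySem.Chars.len w) - ((-1 + (k : Int)) + 1)).toNat '_')
    = pvMaskAt k w := by
  cases k with
  | zero => simp [pvMaskAt, PySem.Chars.len_eq]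
  | succ j =>
    have h1 : (-1 + ((j + 1 : Nat) : Int)) ≠ -1 := by push_cast; omega
    have h2 : (-1 + ((j + 1 : Nat) : Int)) + 1 = ((j + 1 : Nat) : Int) := by push_cast; ring
    rw [if_neg h1, h2]
    simp only [pvMaskAt, PySem.Chars.slice_eq_listSlice, PySem.Chars.len_eq,
      PySem.List.slice_zero_start, PySem.List.slice_to_natCast]
    have h3 : ((w.length : Int) - ((j + 1 : Nat) : Int)).toNat = w.length - (j + 1) := by omega
    rw [h3]

theorem grant_the_hint_eq_alt (txt : String) (_h : Pre_grant_the_hint txt) :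
    grant_the_hint txt = grant_the_hint_alt txt := by
  unfold grant_the_hint grant_the_hint_alt
  set words := PySem.Chars.split₀ txt.toList with hwords
  cases hmax : PySem.List.max? (words.map (fun w => PySem.Chars.len w)) (fun x => x) with
  | none => simp only [hmax]
  | some m =>
    simp only [hmax]
    have hm0 : 0 ≤ m := by
      have hmem := PySem.List.max?_mem hmax
      obtain ⟨w, _, hw⟩ := List.mem_map.mp hmem
      rw [← hw]; simp [PySem.Chars.len_eq]
    -- B side: rewrite the reveal loop by its invariant
    have hm : m = ((m.toNat : Nat) : Int) := by omega
    have hmasks0 : (words.map (fun w => List.replicate w.length '_'))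
        = words.map (pvMaskAt 0) := by
      apply List.map_congr_left; intro w _; rw [pvMaskAt_zero]
    rw [hmasks0, hm, pv_fold_inv words m.toNat]
    -- A side: rewrite the nested foldls into maps
    rw [pv_foldl_append_map (f := fun i =>
      PySem.Chars.join [' ']
        (words.foldl (fun sublst t =>
            sublst ++ [if i = -1 then
                         List.replicate (PySem.Chars.len t).toNat '_'
                       else
                         PySem.Chars.slice t (some 0) (some (i+1)) ++
                           List.replicate ((PySem.Chars.len t) - (i+1)).toNat '_']) []))]
    rw [PySem.List.pyRange_one (-1) ((m.toNat : Nat) : Int)]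
    have hlen : (((m.toNat : Nat) : Int) - -1).toNat = m.toNat + 1 := by omega
    rw [hlen]
    simp only [List.nil_append, List.map_map]
    apply List.map_congr_left
    intro k _
    simp only [Function.comp_def]
    congr 1
    rw [pv_foldl_append_map (f := fun t =>
      if (-1 + (k : Int)) = -1 then
        List.replicate (PySem.Chars.len t).toNat '_'
      else
        PySem.Chars.slice t (some 0) (some ((-1 + (k : Int)) + 1)) ++
          List.replicate ((PySem.Chars.len t) - ((-1 + (k : Int)) + 1)).toNat '_')]
    simp only [List.nil_append]
    apply congrArg
    exact List.map_congr_left (fun w _ => pv_maskA_eq w k)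

-- ===== VERDICT =====
theorem grant_the_hint_spec : Claim_equal_grant_the_hint := by
  intro txt _ hpre
  unfold Spec_grant_the_hint
  exact grant_the_hint_eq_alt txt hpre
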